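-- pv_equiv track=rewrite | github.com/MrBrantCode/unitest_baseline | mut_generate/mist_train_taco/taco_4724/solution.py | find_chef_of_the_year
-- ===== SOURCE A (Python) =====
-- def find_chef_of_the_year(N, M, chefs_and_countries, email_subjects):
--     # Dictionary to map chef names to their countries
--     count_per = {chef: country for chef, country in chefs_and_countries}
--
--     # Dictionary to count votes for each chef
--     per = {}
--
--     # Dictionary to count votes for each country
--     count = {}
--
--     # Process each email subject
--     for subject in email_subjects:
--         if subject in per:
--             per[subject] += 1
--         else:
--             per[subject] = 1
--
--         country = count_per[subject]
--         if country in count: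
--             count[country] += 1
--         else:
--             count[country] = 1
--
--     # Find the country with the most votes
--     max_votes = -1
--     country_of_the_year = ""
--     for country, votes in count.items():
--         if votes > max_votes or (votes == max_votes and country < country_of_the_year):
--             max_votes = votes
--             country_of_the_year = country
--
--     # Find the chef with the most votes
--     max_votes = -1
--     chef_of_the_year = ""
--     for chef, votes in per.items():
--         if votes > max_votes or (votes == max_votes and chef < chef_of_the_year):
--             max_votes = votes
--             chef_of_the_year = chef
--
--     return country_of_the_year, chef_of_the_year
-- ===== SOURCE B (Python) =====
-- def find_chef_of_the_year(N, M, chefs_and_countries, email_subjects):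
--     country_of = dict(chefs_and_countries)
--     countries = [country_of[s] for s in email_subjects]
--
--     def winner(names):
--         # Sort-then-scan: in the sorted list each name's occurrences are
--         # consecutive, so a running run length is its vote total; the strict
--         # '>' keeps the first (lexicographically smallest) name on ties.
--         best, best_votes = "", -1
--         run, prev = 0, None
--         for x in sorted(names):
--             run = run + 1 if x == prev else 1
--             prev = x
--             if run > best_votes:
--                 best_votes, best = run, x
--         return best
--
--     return winner(countries), winner(email_subjects)
-- ===== Notes on version B (the rewrite author's own statement) =====
-- stated objective: alternative
-- what changed: B replaces A's hash-counter dictionaries and running-argmax loops entirely by a sort-then-scan: it sorts each name list, recovers every vote total as a run length over consecutive equal names, and a strict '>' on the running best makes the first (lexicographically smallest) name win ties.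
import Mathlib
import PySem

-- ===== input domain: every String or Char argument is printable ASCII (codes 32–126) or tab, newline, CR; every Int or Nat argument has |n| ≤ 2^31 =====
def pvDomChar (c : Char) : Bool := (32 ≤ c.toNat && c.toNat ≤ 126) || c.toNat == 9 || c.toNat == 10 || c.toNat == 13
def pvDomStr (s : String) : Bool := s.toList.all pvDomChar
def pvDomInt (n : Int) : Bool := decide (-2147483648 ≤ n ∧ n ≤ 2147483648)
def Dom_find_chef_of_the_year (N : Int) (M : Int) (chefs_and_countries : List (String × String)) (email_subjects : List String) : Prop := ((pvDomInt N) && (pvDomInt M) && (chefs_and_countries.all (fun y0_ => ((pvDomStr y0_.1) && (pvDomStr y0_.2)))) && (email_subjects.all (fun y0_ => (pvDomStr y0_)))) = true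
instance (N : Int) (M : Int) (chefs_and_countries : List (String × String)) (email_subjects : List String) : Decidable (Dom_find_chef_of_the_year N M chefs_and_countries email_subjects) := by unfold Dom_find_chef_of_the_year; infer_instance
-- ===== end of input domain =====

-- B replaces A's counting dictionaries and argmax loops by sort-then-scan over runs of equal
-- names, with strict '>' giving the smallest name on ties: an alternative algorithm, not faster.

-- ===== PORT A =====
-- count_per[subject] raises KeyError when subject names no listed chef; those inputs are
-- outside Pre_ below (the port reads a "" default exactly there).
def find_chef_of_the_year (N : Int) (M : Int) (chefs_and_countries : List (String × String)) (email_subjects : List String) : String × String :=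
  let count_per : PySem.Dict String String := PySem.Dict.ofList chefs_and_countries
  let pc :=
    email_subjects.foldl
      (fun (pc : PySem.Dict String Int × PySem.Dict String Int) subject =>
        (if pc.1.contains subject then pc.1.insert subject (pc.1.getD subject 0 + 1)
         else pc.1.insert subject 1,
         let country := (count_per.get? subject).getD ""
         if pc.2.contains country then pc.2.insert country (pc.2.getD country 0 + 1)
         else pc.2.insert country 1))
      (PySem.Dict.empty, PySem.Dict.empty)
  let c :=
    pc.2.items.foldl
      (fun (acc : Int × String) p =>
        if p.2 > acc.1 ∨ (p.2 = acc.1 ∧ p.1 < acc.2) then (p.2, p.1) else acc)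
      (-1, "")
  let ch :=
    pc.1.items.foldl
      (fun (acc : Int × String) p =>
        if p.2 > acc.1 ∨ (p.2 = acc.1 ∧ p.1 < acc.2) then (p.2, p.1) else acc)
      (-1, "")
  (c.2, ch.2)

-- ===== PORT B =====
-- helper 'winner' of Source B: scan sorted(names); state (best, best_votes, run, prev)
def pvWinner (names : List String) : String :=
  ((PySem.List.sorted names (fun x => x) false).foldl
      (fun (acc : String × Int × Int × Option String) x =>
        let run : Int := if some x == acc.2.2.2 then acc.2.2.1 + 1 else 1
        if run > acc.2.1 then (x, run, run, some x) else (acc.1, acc.2.1, run, some x))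
      ("", -1, 0, none)).1

-- country_of[s] raises KeyError when a voted chef is unlisted; outside Pre_ (port reads "").
def find_chef_of_the_year_alt (N : Int) (M : Int) (chefs_and_countries : List (String × String)) (email_subjects : List String) : String × String :=
  let country_of : PySem.Dict String String := PySem.Dict.ofList chefs_and_countries
  let countries := email_subjects.map (fun s => (country_of.get? s).getD "")
  (pvWinner countries, pvWinner email_subjects)

-- ===== PRECONDITION & SPEC =====
-- Pre_ excludes exactly the inputs where some email subject names no chef of
-- chefs_and_countries: there the Python A (and B) raises KeyError.
def Pre_find_chef_of_the_year (N : Int) (M : Int) (chefs_and_countries : List (String × String)) (email_subjects : List String) : Prop :=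
  ∀ s ∈ email_subjects, s ∈ chefs_and_countries.map Prod.fst
instance (N : Int) (M : Int) (chefs_and_countries : List (String × String)) (email_subjects : List String) : Decidable (Pre_find_chef_of_the_year N M chefs_and_countries email_subjects) := by unfold Pre_find_chef_of_the_year; infer_instance

def pvWitness_find_chef_of_the_year : Int × Int × (List (String × String)) × List String :=
  (2, 3, [("alice", "france"), ("bob", "spain")], ["alice", "bob", "alice"])

def Spec_find_chef_of_the_year (N : Int) (M : Int) (chefs_and_countries : List (String × String)) (email_subjects : List String) (out : String × String) : Prop := out = find_chef_of_the_year_alt N M chefs_and_countries email_subjects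
instance (N : Int) (M : Int) (chefs_and_countries : List (String × String)) (email_subjects : List String) (out : String × String) : Decidable (Spec_find_chef_of_the_year N M chefs_and_countries email_subjects out) := by unfold Spec_find_chef_of_the_year; infer_instance

-- ===== CLAIM (what is proved, stated in full; the proofs are below) =====
def Claim_equal_find_chef_of_the_year : Prop := ∀ (N : Int) (M : Int) (chefs_and_countries : List (String × String)) (email_subjects : List String), Dom_find_chef_of_the_year N M chefs_and_countries email_subjects → Pre_find_chef_of_the_year N M chefs_and_countries email_subjects → Spec_find_chef_of_the_year N M chefs_and_countries email_subjects (find_chef_of_the_year N M chefs_and_countries email_subjects)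

-- ===== LEMMAS AND PROOFS =====

-- A's running-argmax step, abbreviated for the lemmas (identical to the inline lambdas of port A).
def pvStep (acc : Int × String) (p : String × Int) : Int × String :=
  if p.2 > acc.1 ∨ (p.2 = acc.1 ∧ p.1 < acc.2) then (p.2, p.1) else acc

-- B's run-scan step, abbreviated for the lemmas (identical to the inline lambda of pvWinner).
def pvBStep (acc : String × Int × Int × Option String) (x : String) : String × Int × Int × Option String :=
  let run : Int := if some x == acc.2.2.2 then acc.2.2.1 + 1 else 1
  if run > acc.2.1 then (x, run, run, some x) else (acc.1, acc.2.1, run, some x)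

-- "m is the (-votes, name)-minimal element of the (multi)set K under vote function g"
def pvMinimal (g : String → Int) (K : List String) (m : String) : Prop :=
  m ∈ K ∧ ∀ x ∈ K, g x < g m ∨ (g x = g m ∧ m ≤ x)

theorem pvMinimal_unique {g : String → Int} {K : List String} {a b : String}
    (ha : pvMinimal g K a) (hb : pvMinimal g K b) : a = b := by
  obtain ⟨haK, hma⟩ := ha
  obtain ⟨hbK, hmb⟩ := hb
  rcases hma b hbK with h1 | ⟨h1, h1'⟩
  · rcases hmb a haK with h2 | ⟨h2, h2'⟩ <;> omega
  · rcases hmb a haK with h2 | ⟨h2, h2'⟩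
    · omega
    · exact le_antisymm h1' h2'

theorem pvStep_char (l : List (String × Int)) (hpos : ∀ p ∈ l, 1 ≤ p.2) :
    (l = [] ∧ l.foldl pvStep (-1, "") = (-1, "")) ∨
    ((((l.foldl pvStep (-1, "")).2, (l.foldl pvStep (-1, "")).1) ∈ l) ∧
      ∀ p ∈ l, p.2 < (l.foldl pvStep (-1, "")).1 ∨
        (p.2 = (l.foldl pvStep (-1, "")).1 ∧ (l.foldl pvStep (-1, "")).2 ≤ p.1)) := by
  induction l using List.reverseRecOn with
  | nil => exact Or.inl ⟨rfl, rfl⟩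
  | append_singleton l x ih =>
    have hpos' : ∀ p ∈ l, 1 ≤ p.2 := fun p hp => hpos p (List.mem_append_left _ hp)
    have hx : (1 : Int) ≤ x.2 := hpos x (List.mem_append_right _ (List.mem_singleton.mpr rfl))
    rw [List.foldl_append, List.foldl_cons, List.foldl_nil]
    set r := l.foldl pvStep (-1, "") with hr
    rcases ih hpos' with ⟨hl, hre⟩ | ⟨hmem, hmin⟩
    · right
      rw [hre]
      unfold pvStep
      rw [if_pos (Or.inl (by omega))]
      subst hl
      constructor
      · simp
      · intro p hp
        simp only [List.nil_append, List.mem_singleton] at hp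
        subst hp
        right
        exact ⟨rfl, le_refl _⟩
    · right
      unfold pvStep
      by_cases hc : x.2 > r.1 ∨ (x.2 = r.1 ∧ x.1 < r.2)
      · rw [if_pos hc]
        refine ⟨List.mem_append_right _ (by simp), ?_⟩
        intro p hp
        dsimp only
        rcases List.mem_append.mp hp with hp | hp
        · rcases hmin p hp with h | ⟨h, h'⟩
          · rcases hc with hc | ⟨hc, hc'⟩
            · exact Or.inl (by omega)
            · exact Or.inl (by omega)
          · rcases hc with hc | ⟨hc, hc'⟩
            · exact Or.inl (by omega)
            · exact Or.inr ⟨by omega, le_of_lt (lt_of_lt_of_le hc' h')⟩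
        · simp only [List.mem_singleton] at hp
          subst hp
          exact Or.inr ⟨rfl, le_refl _⟩
      · rw [if_neg hc]
        push Not at hc
        refine ⟨List.mem_append_left _ hmem, ?_⟩
        intro p hp
        rcases List.mem_append.mp hp with hp | hp
        · exact hmin p hp
        · simp only [List.mem_singleton] at hp
          subst hp
          obtain ⟨h1, h2⟩ := hc
          by_cases he : p.2 = r.1
          · exact Or.inr ⟨he, h2 he⟩
          · exact Or.inl (lt_of_le_of_ne h1 he)

-- characterisation of B's run scan over a ≤-sorted list: prev is a maximal element with run
-- its full count, and (best, best_votes) is the (-count, name)-minimal name with its count.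
theorem pvBStep_char (l : List String) (hs : l.Pairwise (· ≤ ·)) :
    (l = [] ∧ l.foldl pvBStep ("", -1, 0, none) = ("", -1, 0, none)) ∨
    (∃ p, (l.foldl pvBStep ("", -1, 0, none)).2.2.2 = some p ∧ p ∈ l ∧ (∀ a ∈ l, a ≤ p) ∧
      (l.foldl pvBStep ("", -1, 0, none)).2.2.1 = (l.count p : Int) ∧
      (l.foldl pvBStep ("", -1, 0, none)).2.1
        = (l.count (l.foldl pvBStep ("", -1, 0, none)).1 : Int) ∧
      pvMinimal (fun k => (l.count k : Int)) l (l.foldl pvBStep ("", -1, 0, none)).1) := by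
  induction l using List.reverseRecOn with
  | nil => exact Or.inl ⟨rfl, rfl⟩
  | append_singleton l x ih =>
    rw [List.pairwise_append] at hs
    obtain ⟨hsl, -, hle'⟩ := hs
    have hle : ∀ a ∈ l, a ≤ x := fun a ha => hle' a ha x (List.mem_singleton.mpr rfl)
    rw [List.foldl_append, List.foldl_cons, List.foldl_nil]
    set r := l.foldl pvBStep ("", -1, 0, none) with hr
    have hcnt : ∀ y : String, ((l ++ [x]).count y : Int)
        = (l.count y : Int) + (if x = y then 1 else 0) := by
      intro y
      rw [List.count_append, List.count_singleton]
      push_cast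
      split_ifs with h1 h2 h3
      · rfl
      · exact absurd (beq_iff_eq.mp h1) h2
      · exact absurd (beq_iff_eq.mpr h3) (by simpa using h1)
      · rfl
    right
    rcases ih hsl with ⟨hl, hre⟩ | ⟨p, hprev, hpmem, hpmax, hrun, hbv, hbmin⟩
    · -- first element ever: run = 1, best = x
      subst hl
      rw [hre]
      refine ⟨x, ?_, ?_, ?_, ?_, ?_, ?_, ?_⟩ <;>
        simp [pvBStep]
    · have hbpos : (1 : Int) ≤ (l.count r.1 : Int) := by
        exact_mod_cast List.count_pos_iff.mpr hbmin.1
      by_cases hxp : x = p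
      · -- x continues the run of p: run becomes p's full count in l ++ [x]
        subst hxp
        have hstep1 : (if (some x == r.2.2.2) then r.2.2.1 + 1 else 1)
            = (l.count x : Int) + 1 := by
          rw [hprev, hrun]
          simp
        by_cases hup : (l.count x : Int) + 1 > r.2.1
        · -- x's new total beats the old best: x is the unique new argmax
          have hstep : pvBStep r x
              = (x, (l.count x : Int) + 1, (l.count x : Int) + 1, some x) := by
            simp only [pvBStep, hstep1, if_pos hup]
          rw [hstep]
          have hbvle : r.2.1 ≤ (l.count x : Int) := by
            rcases hbmin.2 x hpmem with h | ⟨h, _⟩ <;> dsimp only at h <;> omega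
          refine ⟨x, rfl, List.mem_append_right _ (by simp), ?_, by rw [hcnt]; simp,
            by rw [hcnt]; simp, List.mem_append_right _ (by simp), ?_⟩
          · intro a ha
            rcases List.mem_append.mp ha with ha | ha
            · exact hle a ha
            · simp at ha; subst ha; exact le_refl _
          · intro y hy
            dsimp only
            rw [hcnt, hcnt x]
            have hxx : (if x = x then (1 : Int) else 0) = 1 := if_pos rfl
            rw [hxx]
            by_cases hyx : x = y
            · subst hyx; right; simp
            · simp only [if_neg hyx, add_zero]
              rcases List.mem_append.mp hy with hy | hy
              · left
                rcases hbmin.2 y hy with h | ⟨h, _⟩ <;> dsimp only at h <;> omega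
              · simp at hy; exact absurd hy.symm hyx
        · -- old best stays ahead of x's new total
          have hstep : pvBStep r x
              = (r.1, r.2.1, (l.count x : Int) + 1, some x) := by
            simp only [pvBStep, hstep1, if_neg hup]
          rw [hstep]
          have hbx : r.1 ≠ x := by
            intro h
            rw [h] at hbv
            omega
          refine ⟨x, rfl, List.mem_append_right _ (by simp), ?_, by rw [hcnt]; simp,
            by rw [hbv, hcnt, if_neg (Ne.symm hbx)]; simp,
            List.mem_append_left _ hbmin.1, ?_⟩
          · intro a ha
            rcases List.mem_append.mp ha with ha | ha
            · exact hle a ha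
            · simp at ha; subst ha; exact le_refl _
          · intro y hy
            dsimp only
            rw [hcnt, hcnt r.1]
            simp only [if_neg (Ne.symm hbx), add_zero]
            by_cases hyx : x = y
            · -- y is x itself: its new count is ≤ the old best, and best ≤ x as x tops l
              subst hyx
              have hxx : (if x = x then (1 : Int) else 0) = 1 := if_pos rfl
              rw [hxx, ← hbv]
              by_cases he : (l.count x : Int) + 1 = r.2.1
              · exact Or.inr ⟨he, le_trans (hpmax r.1 hbmin.1) (le_refl x)⟩
              · left; omega
            · simp only [if_neg hyx, add_zero]
              rcases List.mem_append.mp hy with hy | hy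
              · exact hbmin.2 y hy
              · simp at hy; exact absurd hy.symm hyx
      · -- x starts a new run; sortedness forces x ∉ l
        have hxl : x ∉ l := fun hxin =>
          hxp (le_antisymm (hpmax x hxin) (hle p hpmem))
        have hstep1 : (if (some x == r.2.2.2) then r.2.2.1 + 1 else 1) = 1 := by
          rw [hprev]
          simp [hxp]
        have hcx : (l.count x : Int) = 0 := by
          exact_mod_cast List.count_eq_zero_of_not_mem hxl
        have hup : ¬ ((1 : Int) > r.2.1) := by rw [hbv]; omega
        have hstep : pvBStep r x = (r.1, r.2.1, 1, some x) := by
          simp only [pvBStep, hstep1, if_neg hup]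
        rw [hstep]
        have hbx : r.1 ≠ x := fun h => hxl (h ▸ hbmin.1)
        refine ⟨x, rfl, List.mem_append_right _ (by simp), ?_, by rw [hcnt]; simp [hcx],
          by rw [hbv, hcnt, if_neg (Ne.symm hbx)]; simp, List.mem_append_left _ hbmin.1, ?_⟩
        · intro a ha
          rcases List.mem_append.mp ha with ha | ha
          · exact hle a ha
          · simp at ha; subst ha; exact le_refl _
        · intro y hy
          dsimp only
          rw [hcnt, hcnt r.1]
          simp only [if_neg (Ne.symm hbx), add_zero]
          by_cases hyx : x = y
          · subst hyx
            have hxx : (if x = x then (1 : Int) else 0) = 1 := if_pos rfl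
            rw [hxx]
            rw [hcx, ← hbv]
            by_cases he : (0 : Int) + 1 = r.2.1
            · exact Or.inr ⟨he, hle r.1 hbmin.1⟩
            · left; omega
          · simp only [if_neg hyx, add_zero]
            rcases List.mem_append.mp hy with hy | hy
            · exact hbmin.2 y hy
            · simp at hy; exact absurd hy.symm hyx

theorem pvIns (d : PySem.Dict String Int) (s : String) :
    (if d.contains s then d.insert s (d.getD s 0 + 1) else d.insert s 1)
      = d.insert s (d.getD s 0 + 1) := by
  by_cases h : d.contains s
  · rw [if_pos h]
  · rw [if_neg h, PySem.Dict.getD_of_not_contains d 0 (by simpa using h)]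
    norm_num

theorem pvPairSplit (cp : PySem.Dict String String) (es : List String) :
    es.foldl
      (fun (pc : PySem.Dict String Int × PySem.Dict String Int) subject =>
        (if pc.1.contains subject then pc.1.insert subject (pc.1.getD subject 0 + 1)
         else pc.1.insert subject 1,
         let country := (cp.get? subject).getD ""
         if pc.2.contains country then pc.2.insert country (pc.2.getD country 0 + 1)
         else pc.2.insert country 1))
      (PySem.Dict.empty, PySem.Dict.empty)
    = (es.foldl (fun (d : PySem.Dict String Int) s => d.insert s (d.getD s 0 + 1)) PySem.Dict.empty,
       es.foldl (fun (d : PySem.Dict String Int) s =>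
          d.insert ((cp.get? s).getD "") (d.getD ((cp.get? s).getD "") 0 + 1)) PySem.Dict.empty) := by
  induction es using List.reverseRecOn with
  | nil => rfl
  | append_singleton es x ih =>
    simp only [List.foldl_append, List.foldl_cons, List.foldl_nil, ih]
    exact Prod.ext (pvIns _ _) (pvIns _ _)

theorem pvMapFold (f : String → String) (es : List String) (d : PySem.Dict String Int) :
    es.foldl (fun (d : PySem.Dict String Int) s => d.insert (f s) (d.getD (f s) 0 + 1)) d
      = (es.map f).foldl (fun (d : PySem.Dict String Int) c => d.insert c (d.getD c 0 + 1)) d := by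
  induction es generalizing d with
  | nil => rfl
  | cons s t ih => simp only [List.foldl_cons, List.map_cons]; exact ih _

-- A's selection over Counter(l).items equals B's sorted run-scan over l, for every l.
theorem pvMain (l : List String) :
    ((PySem.Dict.counter l).items.foldl pvStep (-1, "")).2 = pvWinner l := by
  have hposc : ∀ p ∈ (PySem.Dict.counter l).items, (1 : Int) ≤ p.2 := by
    intro p hp
    rw [PySem.Dict.items_counter] at hp
    obtain ⟨k, hk, rfl⟩ := List.mem_map.mp hp
    have hmem : k ∈ l := (PySem.Set.mem_ofList l k).mp hk
    show (1 : Int) ≤ (l.count k : Int)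
    exact_mod_cast List.count_pos_iff.mpr hmem
  have hitems : (PySem.Dict.counter l).items
      = (PySem.Set.ofList l).map (fun k => (k, (l.count k : Int))) :=
    PySem.Dict.items_counter l
  have hsp : (PySem.List.sorted l (fun x => x) false).Pairwise (· ≤ ·) := by
    simpa using PySem.List.sorted_pairwise (xs := l) (key := fun x => x)
  have hperm : (PySem.List.sorted l (fun x => x) false).Perm l :=
    PySem.List.sorted_perm (xs := l) (key := fun x => x) (rev := false)
  rcases pvStep_char (PySem.Dict.counter l).items hposc with ⟨hia, hra⟩ | ⟨hmemA, hminA⟩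
  · -- no votes at all: both sides return ""
    have hl : l = [] := by
      rw [hitems] at hia
      have h0 : PySem.Set.ofList l = [] := List.map_eq_nil_iff.mp hia
      rcases l with _ | ⟨a, t⟩
      · rfl
      · exfalso
        have ha : a ∈ PySem.Set.ofList (a :: t) := (PySem.Set.mem_ofList _ _).mpr (by simp)
        rw [h0] at ha
        simp at ha
    subst hl
    rw [hra]
    rfl
  · -- some votes: both sides compute the (-count, name)-minimal name
    set rA := (PySem.Dict.counter l).items.foldl pvStep (-1, "") with hrA
    have hA2 : rA.2 ∈ l ∧ rA.1 = (l.count rA.2 : Int) := by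
      rw [hitems] at hmemA
      obtain ⟨k, hk, he⟩ := List.mem_map.mp hmemA
      obtain ⟨h1, h2⟩ := Prod.mk.injEq _ _ _ _ ▸ he
      exact ⟨h1 ▸ (PySem.Set.mem_ofList l k).mp hk, h2.symm ▸ (by rw [← h1])⟩
    have hminA' : pvMinimal (fun k => (l.count k : Int)) l rA.2 := by
      refine ⟨hA2.1, ?_⟩
      intro y hy
      have hyi : (y, (l.count y : Int)) ∈ (PySem.Dict.counter l).items := by
        rw [hitems]
        exact List.mem_map.mpr ⟨y, (PySem.Set.mem_ofList l y).mpr hy, rfl⟩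
      have h := hminA _ hyi
      dsimp only at h
      rw [hA2.2] at h
      exact h
    rcases pvBStep_char (PySem.List.sorted l (fun x => x) false) hsp with
      ⟨h0, _⟩ | ⟨p, _, _, _, _, _, hbminS⟩
    · exfalso
      have : l = [] := (PySem.List.sorted_eq_nil_iff _ _ _).mp h0
      subst this
      simp [hitems, PySem.Set.ofList] at hmemA
    · have hminB : pvMinimal (fun k => (l.count k : Int)) l
          ((PySem.List.sorted l (fun x => x) false).foldl pvBStep ("", -1, 0, none)).1 := by
        obtain ⟨hmem, hmin⟩ := hbminS
        refine ⟨hperm.mem_iff.mp hmem, ?_⟩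
        intro y hy
        have h := hmin y (hperm.mem_iff.mpr hy)
        dsimp only at h ⊢
        rw [hperm.count_eq, hperm.count_eq] at h
        exact h
      exact pvMinimal_unique hminA' hminB

-- ===== VERDICT (by name: the statement is the Claim_ definition above) =====
theorem find_chef_of_the_year_spec : Claim_equal_find_chef_of_the_year := by
  intro N M cac es _hDom _hPre
  unfold Spec_find_chef_of_the_year
  simp only [find_chef_of_the_year, find_chef_of_the_year_alt]
  rw [pvPairSplit]
  set f : String → String := fun s => ((PySem.Dict.ofList cac).get? s).getD "" with hf
  have hstep : (fun (acc : Int × String) (p : String × Int) =>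
      if p.2 > acc.1 ∨ (p.2 = acc.1 ∧ p.1 < acc.2) then (p.2, p.1) else acc) = pvStep := rfl
  rw [hstep]
  have hchef : es.foldl (fun (d : PySem.Dict String Int) s => d.insert s (d.getD s 0 + 1))
      PySem.Dict.empty = PySem.Dict.counter es :=
    PySem.Dict.foldl_insert_getD_add_one_eq_counter es
  have hcty : es.foldl (fun (d : PySem.Dict String Int) s =>
      d.insert (f s) (d.getD (f s) 0 + 1)) PySem.Dict.empty = PySem.Dict.counter (es.map f) := by
    rw [pvMapFold, PySem.Dict.foldl_insert_getD_add_one_eq_counter]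
  rw [hchef, hcty]
  exact Prod.ext (pvMain (es.map f)) (pvMain es)
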